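-- pv_equiv track=rewrite | github.com/DinkinsX/Cryptographic_complex | Hill_prog.py | mul_str_matr
-- ===== SOURCE A (Python) =====
-- def mul_str_matr(str,matrix):
--     result = []
--
--     for i in range(len(matrix[0])):
--         mul = 0
--         for j in range(len(str)):
--             mul += str[j]*matrix[j][i]
--         result.append(mul)
--
--     return result
-- ===== SOURCE B (Python) =====
-- def mul_str_matr(str, matrix):
--     # saxpy: accumulate scaled matrix rows into a running result vector
--     result = [0] * len(matrix[0])
--     for x, row in zip(str, matrix):
--         result = [r + x * e for r, e in zip(result, row)]
--     return result
-- ===== Notes on version B (the rewrite author's own statement) =====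
-- stated objective: alternative
-- what changed: Replaces the per-column dot-product nesting (outer loop over columns, inner scan of the vector) by a single pass over the rows that accumulates str[j]*matrix[j] into a running result vector (saxpy / linear combination of rows), building all outputs simultaneously.
import Mathlib
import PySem

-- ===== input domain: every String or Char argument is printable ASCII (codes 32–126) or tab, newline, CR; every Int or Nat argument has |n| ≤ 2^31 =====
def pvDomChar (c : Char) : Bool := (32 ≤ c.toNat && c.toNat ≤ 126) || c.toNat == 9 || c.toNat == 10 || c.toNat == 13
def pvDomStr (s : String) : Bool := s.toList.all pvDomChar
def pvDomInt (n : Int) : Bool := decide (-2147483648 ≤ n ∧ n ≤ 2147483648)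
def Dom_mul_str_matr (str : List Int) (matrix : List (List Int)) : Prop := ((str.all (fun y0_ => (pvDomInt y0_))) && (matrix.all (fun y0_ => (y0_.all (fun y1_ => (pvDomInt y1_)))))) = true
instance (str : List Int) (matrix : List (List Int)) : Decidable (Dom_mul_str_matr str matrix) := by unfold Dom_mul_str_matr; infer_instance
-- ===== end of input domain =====

-- B changes the decomposition: instead of finishing one dot product per output column,
-- it builds all outputs simultaneously as a running linear combination of the scaled rows.

-- ===== PORT A =====
-- for i in range(len(matrix[0])): mul = 0; for j in range(len(str)): mul += str[j]*matrix[j][i]; result.append(mul)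
-- matrix[0] ported as headD [] and indexing as getD: exact on Pre_ (all accesses in range there).
def mul_str_matr (str : List Int) (matrix : List (List Int)) : List Int :=
  (List.range (matrix.headD []).length).foldl
    (fun result i =>
      result ++ [(List.range str.length).foldl
        (fun mul j => mul + str.getD j 0 * (matrix.getD j []).getD i 0) 0])
    []

-- ===== PORT B =====
-- result = [0]*len(matrix[0]); for x,row in zip(str,matrix): result = [r + x*e for r,e in zip(result,row)]
def mul_str_matr_alt (str : List Int) (matrix : List (List Int)) : List Int :=
  (str.zip matrix).foldl
    (fun result p => (result.zip p.2).map (fun q => q.1 + p.1 * q.2))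
    (List.replicate (matrix.headD []).length 0)

-- ===== PRECONDITION & SPEC =====
-- Pre_ is exactly the set of inputs on which Python A returns (it raises IndexError on an
-- empty matrix, and — when matrix[0] is nonempty — when str is longer than matrix or some
-- of the first len(str) rows is shorter than matrix[0]).
def Pre_mul_str_matr (str : List Int) (matrix : List (List Int)) : Prop :=
  matrix ≠ [] ∧
    ((matrix.headD []).length = 0 ∨
      (str.length ≤ matrix.length ∧
        ∀ j, j < str.length → (matrix.headD []).length ≤ (matrix.getD j []).length))
instance (str : List Int) (matrix : List (List Int)) : Decidable (Pre_mul_str_matr str matrix) := by unfold Pre_mul_str_matr; infer_instance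
def pvWitness_mul_str_matr : List Int × List (List Int) := ([1, 2], [[1, 0], [0, 1]])
def Spec_mul_str_matr (str : List Int) (matrix : List (List Int)) (out : List Int) : Prop := out = mul_str_matr_alt str matrix
instance (str : List Int) (matrix : List (List Int)) (out : List Int) : Decidable (Spec_mul_str_matr str matrix out) := by unfold Spec_mul_str_matr; infer_instance

-- ===== CLAIM (what is proved, stated in full; the proofs are below) =====
def Claim_equal_mul_str_matr : Prop := ∀ (str : List Int) (matrix : List (List Int)), Dom_mul_str_matr str matrix → Pre_mul_str_matr str matrix → Spec_mul_str_matr str matrix (mul_str_matr str matrix)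

-- ===== LEMMAS AND PROOFS =====

-- a vector is the range-map of its getD values
theorem map_getD_range_int (l : List Int) :
    (List.range l.length).map (fun i => l.getD i (0 : Int)) = l := by
  apply List.ext_getElem
  · simp
  · intro i h1 h2
    simp [List.getD, List.getElem?_eq_getElem h2]

-- B's fold with an empty accumulator stays empty
theorem saxpy_nil_acc (l : List (Int × List Int)) :
    l.foldl (fun (result : List Int) p => (result.zip p.2).map (fun q => q.1 + p.1 * q.2)) [] = [] := by
  induction l with
  | nil => rfl
  | cons p t ih => simpa using ih

-- invariant of B's row loop: after folding the rows, entry i is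
-- acc[i] plus the dot product of str with column i (as a sum, j-ascending)
theorem saxpy_key (s : List Int) :
    ∀ (m : List (List Int)) (acc : List Int),
      s.length ≤ m.length →
      (∀ j, j < s.length → acc.length ≤ (m.getD j []).length) →
      (s.zip m).foldl (fun result p => (result.zip p.2).map (fun q => q.1 + p.1 * q.2)) acc
        = (List.range acc.length).map (fun i =>
            acc.getD i 0 +
              ((List.range s.length).map (fun j => s.getD j 0 * (m.getD j []).getD i 0)).sum) := by
  induction s with
  | nil =>
    intro m acc _ _
    simpa using (map_getD_range_int acc).symm
  | cons x xs ih =>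
    intro m acc hlen hrow
    cases m with
    | nil => simp at hlen
    | cons r rs =>
      have hr0 : acc.length ≤ r.length := by
        simpa using hrow 0 (Nat.succ_pos _)
      have hacc' : ((acc.zip r).map (fun q => q.1 + x * q.2)).length = acc.length := by
        simp [Nat.min_eq_left hr0]
      have step := ih rs ((acc.zip r).map (fun q => q.1 + x * q.2))
        (by simpa using hlen)
        (by
          intro j hj
          have hj1 : j + 1 < (x :: xs).length := by simp; omega
          rw [hacc']
          simpa using hrow (j + 1) hj1)
      rw [List.zip_cons_cons, List.foldl_cons, step, hacc']
      apply List.map_congr_left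
      intro i hi
      have hi' : i < acc.length := List.mem_range.mp hi
      have hacc : ((acc.zip r).map (fun q => q.1 + x * q.2)).getD i 0
          = acc.getD i 0 + x * r.getD i 0 := by
        have hiz : i < ((acc.zip r).map (fun q => q.1 + x * q.2)).length := by omega
        rw [List.getD_eq_getElem _ _ hiz, List.getElem_map, List.getElem_zip,
          List.getD_eq_getElem _ _ hi',
          List.getD_eq_getElem _ _ (by omega : i < r.length)]
      rw [hacc]
      simp [List.length_cons, List.range_succ_eq_map, List.map_map, Function.comp_def, List.getElem?_cons_succ, add_assoc]

-- ===== VERDICT (by name: the statement is the Claim_ definition above) =====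
theorem mul_str_matr_spec : Claim_equal_mul_str_matr := by
  intro s m _ hpre
  obtain ⟨hne, hcase⟩ := hpre
  unfold Spec_mul_str_matr mul_str_matr mul_str_matr_alt
  rcases hcase with h0 | ⟨hlen, hrow⟩
  · rw [h0]
    simp [saxpy_nil_acc]
  · rw [saxpy_key s m (List.replicate (m.headD []).length 0) hlen
      (by intro j hj; simpa using hrow j hj)]
    rw [PySem.List.foldl_append_singleton_eq_map]
    simp [PySem.List.foldl_add]
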